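-- pv_equiv track=rewrite | github.com/KevinSassani/Metro_Delay_Prediction | planned_weekend_dependencies.py | calculate_planned_interval_between_trains
-- ===== SOURCE A (Python) =====
-- def calculate_planned_interval_between_trains(both_lines_departure_arrival, date):
--     """
--     Organize and sort the planned departure times of trains for a specific date.
--
--     This function organizes the departure times of trains by station and sorts them
--     in chronological order for each station. It processes the planned departure and
--     arrival times for two train lines (e.g., line 13 and line 14) on a specific date.
--
--     Parameters:
--     both_lines_departure_arrival (dict): A dictionary where each key is a trip ID, and
--                                          the value is a list of dictionaries containing
--                                          station, departure, and arrival times.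
--     date (str): The specific date for which to organize and sort the departure times,
--                 in the format "YYYY-MM-DD".
--
--     Returns:
--     dict: A dictionary that organizes the departure times by station for the specified date,
--           with each station's departures sorted chronologically.
--     """
--
--     organized_data = {}
--
--     # Iterate through the planned departure and arrival times for each trip
--     for trip_id, trips_list in both_lines_departure_arrival.items():
--         if date not in organized_data:
--             organized_data[date] = {}
--
--         # Process each station's data within the trip
--         for trip in trips_list:
--             station = trip["station"]
--             departure = trip["departure"]
--
--             # Initialize the station's list if it doesn't exist in the dictionary
--             if station not in organized_data[date]:
--                 organized_data[date][station] = []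
--
--             # Append the trip ID and departure time to the station's list
--             organized_data[date][station].append(
--                 {'trip_id': trip_id, 'departure_time': departure}
--             )
--
--     # Sort the trips for each station by departure time
--     for date, stations_data in organized_data.items():
--         for station, trips in stations_data.items():
--             sorted_trips = sorted(trips, key=lambda x: x['departure_time'])
--             organized_data[date][station] = sorted_trips
--
--     return organized_data
-- ===== SOURCE B (Python) =====
-- def calculate_planned_interval_between_trains(both_lines_departure_arrival, date):
--     """One flat record list, one global stable sort by departure time, then a
--     single distribution pass into per-station lists (station keys seeded in
--     first-encounter order)."""
--     organized_data = {}
--     if both_lines_departure_arrival: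
--         stations = {}   # station -> list of records, keys in first-encounter order
--         records = []    # flat (station, record) pairs in encounter order
--         for trip_id, trips_list in both_lines_departure_arrival.items():
--             for trip in trips_list:
--                 station = trip["station"]
--                 stations.setdefault(station, [])
--                 records.append(
--                     (station, {'trip_id': trip_id, 'departure_time': trip["departure"]})
--                 )
--         # one global stable sort instead of one sort per station
--         records.sort(key=lambda r: r[1]['departure_time'])
--         for station, record in records:
--             stations[station].append(record)
--         organized_data[date] = stations
--     return organized_data
-- ===== Notes on version B (the rewrite author's own statement) =====
-- stated objective: alternative
-- what changed: A builds nested per-station lists while iterating and then sorts each station's list separately; B flattens all trips into one record list, does ONE global stable sort by departure time, and distributes the sorted records into station lists seeded in first-encounter order.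
import Mathlib
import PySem

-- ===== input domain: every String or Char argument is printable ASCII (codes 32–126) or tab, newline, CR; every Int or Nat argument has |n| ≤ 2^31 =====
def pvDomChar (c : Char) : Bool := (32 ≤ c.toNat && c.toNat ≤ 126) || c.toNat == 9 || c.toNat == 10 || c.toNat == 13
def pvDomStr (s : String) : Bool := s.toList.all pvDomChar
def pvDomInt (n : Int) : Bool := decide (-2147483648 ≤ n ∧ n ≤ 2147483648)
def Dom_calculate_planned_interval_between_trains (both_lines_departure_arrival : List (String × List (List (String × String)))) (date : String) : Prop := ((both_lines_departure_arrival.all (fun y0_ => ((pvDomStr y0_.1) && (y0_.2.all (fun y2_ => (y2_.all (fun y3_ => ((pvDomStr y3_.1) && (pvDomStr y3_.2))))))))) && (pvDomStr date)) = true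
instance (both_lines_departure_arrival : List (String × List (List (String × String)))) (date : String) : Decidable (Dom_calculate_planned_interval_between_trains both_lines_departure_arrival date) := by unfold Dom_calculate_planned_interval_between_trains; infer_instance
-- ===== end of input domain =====

-- B replaces A's nested-dict grouping followed by one sort per station with one flat record
-- list, ONE global stable sort by departure time, and a single distribution pass (alternative
-- decomposition; return-value equivalence — neither version mutates its arguments).

-- ===== PORT A =====
-- A, transliterated: nested dicts built trip by trip, then every station list sorted
-- (the final in-place overwrite loop rewrites each value, i.e. maps over the items).
def calculate_planned_interval_between_trains (both_lines_departure_arrival : List (String × List (List (String × String)))) (date : String) : List (String × List (String × List (List (String × String)))) :=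
  let organized_data : PySem.Dict String (PySem.Dict String (List (List (String × String)))) :=
    both_lines_departure_arrival.foldl (fun od p =>
      -- if date not in organized_data: organized_data[date] = {}
      let od := if od.contains date then od else od.insert date PySem.Dict.empty
      p.2.foldl (fun od trip =>
        -- trip["station"] / trip["departure"]; Pre_ guarantees both keys (Python raises KeyError otherwise)
        let station := (PySem.Dict.mk trip).getD "station" ""
        let departure := (PySem.Dict.mk trip).getD "departure" ""
        -- if station not in organized_data[date]: organized_data[date][station] = []
        let od := if (od.getD date PySem.Dict.empty).contains station then od
                  else od.insert date ((od.getD date PySem.Dict.empty).insert station [])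
        -- organized_data[date][station].append({'trip_id': trip_id, 'departure_time': departure})
        od.insert date ((od.getD date PySem.Dict.empty).modify station []
          (fun l => l ++ [[("trip_id", p.1), ("departure_time", departure)]]))) od)
      PySem.Dict.empty
  (organized_data.items.map (fun dp => (dp.1,
     dp.2.items.map (fun sp => (sp.1,
       PySem.List.sorted sp.2 (fun x => (PySem.Dict.mk x).getD "departure_time" "") false)))))

-- ===== PORT B =====
-- B, transliterated: one loop seeding station keys and flattening records, one global
-- stable sort by departure time, one distribution pass appending into the seeded lists.
def calculate_planned_interval_between_trains_alt (both_lines_departure_arrival : List (String × List (List (String × String)))) (date : String) : List (String × List (String × List (List (String × String)))) :=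
  if both_lines_departure_arrival.isEmpty then []
  else
    let sr : PySem.Dict String (List (List (String × String))) × List (String × List (String × String)) :=
      both_lines_departure_arrival.foldl (fun sr p =>
        p.2.foldl (fun sr trip =>
          let station := (PySem.Dict.mk trip).getD "station" ""   -- trip["station"]; Pre_ guarantees the key
          (sr.1.setdefault station [],
           sr.2 ++ [(station, [("trip_id", p.1),
                               ("departure_time", (PySem.Dict.mk trip).getD "departure" "")])])) sr)
        (PySem.Dict.empty, [])
    -- records.sort(key=lambda r: r[1]['departure_time'])  (stable)
    let records := PySem.List.sorted sr.2 (fun r => (PySem.Dict.mk r.2).getD "departure_time" "") false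
    -- for station, record in records: stations[station].append(record)  (key always seeded)
    let stations := records.foldl (fun st r => st.modify r.1 [] (fun l => l ++ [r.2])) sr.1
    [(date, stations.items)]

-- ===== PRECONDITION & SPEC =====
-- Pre_ excludes association lists that are not valid pictures of Python dicts (duplicate keys
-- in the outer dict or inside a trip dict cannot arise from a real dict) and trips lacking a
-- "station" or "departure" key, on which A raises KeyError.
def Pre_calculate_planned_interval_between_trains (both_lines_departure_arrival : List (String × List (List (String × String)))) (date : String) : Prop :=
  (both_lines_departure_arrival.map Prod.fst).Nodup ∧
  ∀ p ∈ both_lines_departure_arrival, ∀ trip ∈ p.2,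
    (trip.map Prod.fst).Nodup ∧
    (PySem.Dict.mk trip).contains "station" = true ∧
    (PySem.Dict.mk trip).contains "departure" = true
instance (both_lines_departure_arrival : List (String × List (List (String × String)))) (date : String) : Decidable (Pre_calculate_planned_interval_between_trains both_lines_departure_arrival date) := by unfold Pre_calculate_planned_interval_between_trains; infer_instance
def pvWitness_calculate_planned_interval_between_trains : (List (String × List (List (String × String)))) × String :=
  ([("t1", [[("station", "A"), ("departure", "07:10"), ("arrival", "07:15")],
            [("station", "B"), ("departure", "07:00"), ("arrival", "07:05")]]),
    ("t2", [[("station", "A"), ("departure", "07:00"), ("arrival", "07:02")]])], "2024-01-01")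

def Spec_calculate_planned_interval_between_trains (both_lines_departure_arrival : List (String × List (List (String × String)))) (date : String) (out : List (String × List (String × List (List (String × String))))) : Prop := out = calculate_planned_interval_between_trains_alt both_lines_departure_arrival date
instance (both_lines_departure_arrival : List (String × List (List (String × String)))) (date : String) (out : List (String × List (String × List (List (String × String))))) : Decidable (Spec_calculate_planned_interval_between_trains both_lines_departure_arrival date out) := by
  unfold Spec_calculate_planned_interval_between_trains
  letI : DecidableEq (String × List (String × List (List (String × String)))) := instDecidableEqProd
  infer_instance

-- ===== CLAIM (what is proved, stated in full; the proofs are below) =====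
def Claim_equal_calculate_planned_interval_between_trains : Prop := ∀ (both_lines_departure_arrival : List (String × List (List (String × String)))) (date : String), Dom_calculate_planned_interval_between_trains both_lines_departure_arrival date → Pre_calculate_planned_interval_between_trains both_lines_departure_arrival date → Spec_calculate_planned_interval_between_trains both_lines_departure_arrival date (calculate_planned_interval_between_trains both_lines_departure_arrival date)

-- ===== LEMMAS AND PROOFS =====

-- shared vocabulary of the proofs
def pvStation (trip : List (String × String)) : String := (PySem.Dict.mk trip).getD "station" ""
def pvRec (tid : String) (trip : List (String × String)) : List (String × String) :=
  [("trip_id", tid), ("departure_time", (PySem.Dict.mk trip).getD "departure" "")]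
def pvKey (x : List (String × String)) : String := (PySem.Dict.mk x).getD "departure_time" ""
def pvFlat (bl : List (String × List (List (String × String)))) : List (String × List (String × String)) :=
  bl.flatMap (fun p => p.2.map (fun t => (pvStation t, pvRec p.1 t)))
-- A's per-record grouping step on the inner dict
def pvG (d : PySem.Dict String (List (List (String × String)))) (r : String × List (String × String)) : PySem.Dict String (List (List (String × String))) :=
  (if d.contains r.1 then d else d.insert r.1 []).modify r.1 [] (fun l => l ++ [r.2])

-- ---- stable-sort lemmas (String keys) ----
theorem pv_insertBy_front {α : Type} (before : α → α → Bool) (x : α) (l : List α)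
    (h : ∀ z ∈ l, before x z = true) :
    PySem.List.insertBy before x l = x :: l := by
  cases l with
  | nil => rfl
  | cons y ys =>
    simp only [PySem.List.insertBy]
    rw [if_pos (h y (List.mem_cons_self))]

theorem pv_insertBy_map {α β : Type} (f : α → β) (before : β → β → Bool) (x : α) (acc : List α) :
    (PySem.List.insertBy (fun a b => before (f a) (f b)) x acc).map f
      = PySem.List.insertBy before (f x) (acc.map f) := by
  induction acc with
  | nil => rfl
  | cons y ys ih =>
    simp only [PySem.List.insertBy, List.map_cons]
    by_cases hb : before (f x) (f y) = true
    · rw [if_pos hb, if_pos hb, List.map_cons, List.map_cons]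
    · rw [if_neg hb, if_neg hb, List.map_cons, ih]

theorem pv_sorted_map {α β : Type} (f : α → β) (key : β → String) (L : List α) :
    (PySem.List.sorted L (fun r => key (f r)) false).map f
      = PySem.List.sorted (L.map f) key false := by
  rw [PySem.List.sorted_eq_foldl_insertBy, PySem.List.sorted_eq_foldl_insertBy]
  have h : ∀ (before : String → String → Bool) (L : List α) (acc : List α),
      (L.foldl (fun acc x => PySem.List.insertBy (fun a b => before (key (f a)) (key (f b))) x acc) acc).map f
        = (L.map f).foldl (fun acc x => PySem.List.insertBy (fun a b => before (key a) (key b)) x acc) (acc.map f) := by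
    intro before L
    induction L with
    | nil => intro acc; rfl
    | cons x xs ih =>
      intro acc
      simp only [List.foldl_cons, List.map_cons, ih,
        pv_insertBy_map f (fun a b => before (key a) (key b)) x acc]
  exact h (fun a b => decide (a < b)) L []

theorem pv_insertBy_pairwise {α : Type} (key : α → String) (x : α) (acc : List α)
    (h : acc.Pairwise (fun a b => key a ≤ key b)) :
    (PySem.List.insertBy (fun a b => decide (key a < key b)) x acc).Pairwise (fun a b => key a ≤ key b) := by
  induction acc with
  | nil => exact List.pairwise_singleton _ x
  | cons y ys ih =>
    rcases List.pairwise_cons.mp h with ⟨hy, hys⟩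
    simp only [PySem.List.insertBy]
    by_cases hxy : key x < key y
    · rw [if_pos (decide_eq_true hxy)]
      refine List.pairwise_cons.mpr ⟨?_, h⟩
      intro z hz
      rcases List.mem_cons.mp hz with rfl | hz
      · exact le_of_lt hxy
      · exact le_trans (le_of_lt hxy) (hy z hz)
    · rw [if_neg (fun hc => hxy (of_decide_eq_true hc))]
      refine List.pairwise_cons.mpr ⟨?_, ih hys⟩
      intro z hz
      rcases (PySem.List.mem_insertBy _ _ _ _).mp hz with rfl | hz
      · exact le_of_not_gt hxy
      · exact hy z hz

theorem pv_insertBy_filter {α : Type} (q : α → Bool) (key : α → String) (x : α) (acc : List α)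
    (h : acc.Pairwise (fun a b => key a ≤ key b)) :
    (PySem.List.insertBy (fun a b => decide (key a < key b)) x acc).filter q
      = if q x then PySem.List.insertBy (fun a b => decide (key a < key b)) x (acc.filter q)
        else acc.filter q := by
  induction acc with
  | nil =>
    cases hqx : q x
    · rw [if_neg Bool.false_ne_true]
      show List.filter q [x] = _
      rw [List.filter_cons_of_neg (by rw [hqx]; exact Bool.false_ne_true)]
    · rw [if_pos rfl]
      show List.filter q [x] = _
      rw [List.filter_cons_of_pos hqx]
      rfl
  | cons y ys ih =>
    rcases List.pairwise_cons.mp h with ⟨hy, hys⟩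
    simp only [PySem.List.insertBy]
    by_cases hxy : key x < key y
    · rw [if_pos (decide_eq_true hxy)]
      have hfront : ∀ z ∈ ys.filter q, decide (key x < key z) = true := fun z hz =>
        decide_eq_true (lt_of_lt_of_le hxy (hy z (List.mem_filter.mp hz).1))
      cases hqy : q y <;> cases hqx : q x <;>
        simp only [List.filter_cons, hqy, hqx, Bool.false_eq_true, reduceIte]
      · exact (pv_insertBy_front _ x _ hfront).symm
      · simp only [PySem.List.insertBy]
        rw [if_pos (decide_eq_true hxy)]
    · rw [if_neg (fun hc => hxy (of_decide_eq_true hc))]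
      cases hqy : q y <;> cases hqx : q x <;>
        simp only [List.filter_cons, hqy, hqx, Bool.false_eq_true, reduceIte, ih hys]
      simp only [PySem.List.insertBy]
      rw [if_neg (fun hc => hxy (of_decide_eq_true hc))]

theorem pv_sorted_filter {α : Type} (q : α → Bool) (key : α → String) (L : List α) :
    (PySem.List.sorted L key false).filter q = PySem.List.sorted (L.filter q) key false := by
  rw [PySem.List.sorted_eq_foldl_insertBy, PySem.List.sorted_eq_foldl_insertBy]
  have h : ∀ (L : List α) (acc : List α), acc.Pairwise (fun a b => key a ≤ key b) →
      (L.foldl (fun acc x => PySem.List.insertBy (fun a b => decide (key a < key b)) x acc) acc).filter q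
        = (L.filter q).foldl (fun acc x => PySem.List.insertBy (fun a b => decide (key a < key b)) x acc) (acc.filter q) := by
    intro L
    induction L with
    | nil => intro acc _; rfl
    | cons x xs ih =>
      intro acc hacc
      simp only [List.foldl_cons, List.filter_cons]
      rw [ih _ (pv_insertBy_pairwise key x acc hacc), pv_insertBy_filter q key x acc hacc]
      by_cases hqx : q x = true
      · rw [if_pos hqx, if_pos hqx, List.foldl_cons]
      · rw [if_neg hqx, if_neg hqx]
  exact h L [] List.Pairwise.nil

-- ---- small dict facts ----
theorem pv_mk_single_contains {ν : Type} (k : String) (v : ν) :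
    (PySem.Dict.mk [(k, v)]).contains k = true := by
  simp [PySem.Dict.contains]

theorem pv_mk_single_getD {ν : Type} (k : String) (v d0 : ν) :
    (PySem.Dict.mk [(k, v)]).getD k d0 = v := by
  simp [PySem.Dict.getD, PySem.Dict.get?]

theorem pv_mk_single_insert {ν : Type} (k : String) (v w : ν) :
    (PySem.Dict.mk [(k, v)]).insert k w = PySem.Dict.mk [(k, w)] := by
  simp [PySem.Dict.insert, PySem.Dict.contains]

theorem pv_empty_insert {ν : Type} (k : String) (v : ν) :
    (PySem.Dict.empty : PySem.Dict String ν).insert k v = PySem.Dict.mk [(k, v)] := by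
  simp [PySem.Dict.insert, PySem.Dict.contains, PySem.Dict.empty]

-- ---- A's grouping step ----
theorem pv_getD_g (d : PySem.Dict String (List (List (String × String))))
    (r : String × List (String × String)) (s : String) :
    (pvG d r).getD s [] = if s = r.1 then d.getD r.1 [] ++ [r.2] else d.getD s [] := by
  unfold pvG PySem.Dict.modify
  cases hc : d.contains r.1
  · simp only [Bool.false_eq_true, if_false]
    rw [PySem.Dict.getD_insert]
    by_cases hs : s = r.1
    · rw [if_pos hs, if_pos hs, PySem.Dict.getD_insert_self,
          PySem.Dict.getD_of_not_contains d [] hc]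
    · rw [if_neg hs, if_neg hs, PySem.Dict.getD_insert_of_ne d [] [] hs]
  · simp only [if_true]
    rw [PySem.Dict.getD_insert]

theorem pv_keys_g (d : PySem.Dict String (List (List (String × String))))
    (r : String × List (String × String)) :
    (pvG d r).keys = PySem.Set.add d.keys r.1 := by
  unfold pvG
  cases hc : d.contains r.1
  · have hnm : r.1 ∉ d.keys := fun hm => by
      simp [(PySem.Dict.contains_iff_mem_keys d r.1).mpr hm] at hc
    rw [if_neg Bool.false_ne_true, PySem.Dict.keys_modify,
        PySem.Dict.keys_insert_of_contains _ _ (PySem.Dict.contains_insert_self d r.1 []),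
        PySem.Dict.keys_insert_of_not_contains _ _ hc,
        PySem.Set.add_of_not_mem hnm]
  · rw [if_pos rfl, PySem.Dict.keys_modify,
        PySem.Dict.keys_insert_of_contains _ _ hc,
        PySem.Set.add_of_mem ((PySem.Dict.contains_iff_mem_keys d r.1).mp hc)]

theorem pv_getD_g_fold (L : List (String × List (String × String)))
    (d : PySem.Dict String (List (List (String × String)))) (s : String) :
    (L.foldl pvG d).getD s [] = d.getD s [] ++ (L.filter (fun p => p.1 == s)).map (fun p => p.2) := by
  induction L generalizing d with
  | nil => simp
  | cons r L ih =>
    simp only [List.foldl_cons, List.filter_cons]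
    rw [ih, pv_getD_g]
    by_cases hs : r.1 = s
    · subst hs; simp
    · have : ¬ s = r.1 := fun h => hs h.symm
      simp [this, hs]

theorem pv_keys_g_fold (L : List (String × List (String × String)))
    (d : PySem.Dict String (List (List (String × String)))) :
    (L.foldl pvG d).keys = PySem.Set.update d.keys (L.map (fun p => p.1)) := by
  induction L generalizing d with
  | nil => simp [PySem.Set.update_nil]
  | cons r L ih =>
    simp only [List.foldl_cons, List.map_cons]
    rw [ih, pv_keys_g, PySem.Set.update_cons]

-- ---- A's whole first phase collapses to the flat grouping fold ----
theorem pv_A_inner (date tid : String) (trips : List (List (String × String)))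
    (inner : PySem.Dict String (List (List (String × String)))) :
    trips.foldl (fun od trip =>
        let station := (PySem.Dict.mk trip).getD "station" ""
        let departure := (PySem.Dict.mk trip).getD "departure" ""
        let od := if (od.getD date PySem.Dict.empty).contains station then od
                  else od.insert date ((od.getD date PySem.Dict.empty).insert station [])
        od.insert date ((od.getD date PySem.Dict.empty).modify station []
          (fun l => l ++ [[("trip_id", tid), ("departure_time", departure)]])))
      (PySem.Dict.mk [(date, inner)])
      = PySem.Dict.mk [(date, (trips.map (fun t => (pvStation t, pvRec tid t))).foldl pvG inner)] := by
  induction trips generalizing inner with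
  | nil => rfl
  | cons t trips ih =>
    simp only [List.foldl_cons, List.map_cons, pv_mk_single_getD]
    cases hc : inner.contains ((PySem.Dict.mk t).getD "station" "")
    · simp only [Bool.false_eq_true, if_false, pv_mk_single_insert, pv_mk_single_getD]
      rw [ih]
      have hg : pvG inner (pvStation t, pvRec tid t)
          = (inner.insert ((PySem.Dict.mk t).getD "station" "") []).modify
              ((PySem.Dict.mk t).getD "station" "") []
              (fun l => l ++ [[("trip_id", tid),
                ("departure_time", (PySem.Dict.mk t).getD "departure" "")]]) := by
        simp only [pvG, pvStation, pvRec, hc, Bool.false_eq_true, if_false]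
      rw [hg]
    · simp only [if_true, pv_mk_single_insert, pv_mk_single_getD]
      rw [ih]
      have hg : pvG inner (pvStation t, pvRec tid t)
          = inner.modify ((PySem.Dict.mk t).getD "station" "") []
              (fun l => l ++ [[("trip_id", tid),
                ("departure_time", (PySem.Dict.mk t).getD "departure" "")]]) := by
        simp only [pvG, pvStation, pvRec, hc, if_true]
      rw [hg]

theorem pv_A_outer (date : String) (bl : List (String × List (List (String × String))))
    (inner : PySem.Dict String (List (List (String × String)))) :
    bl.foldl (fun od p =>
        let od := if od.contains date then od else od.insert date PySem.Dict.empty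
        p.2.foldl (fun od trip =>
          let station := (PySem.Dict.mk trip).getD "station" ""
          let departure := (PySem.Dict.mk trip).getD "departure" ""
          let od := if (od.getD date PySem.Dict.empty).contains station then od
                    else od.insert date ((od.getD date PySem.Dict.empty).insert station [])
          od.insert date ((od.getD date PySem.Dict.empty).modify station []
            (fun l => l ++ [[("trip_id", p.1), ("departure_time", departure)]]))) od)
      (PySem.Dict.mk [(date, inner)])
      = PySem.Dict.mk [(date, (pvFlat bl).foldl pvG inner)] := by
  induction bl generalizing inner with
  | nil => simp [pvFlat]
  | cons p bl ih =>
    simp only [List.foldl_cons, pv_mk_single_contains, if_true]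
    rw [pv_A_inner date p.1 p.2 inner, ih]
    simp [pvFlat, List.foldl_append]

-- ---- B's seeding fold ----
theorem pv_seed_getD (L : List (String × List (String × String)))
    (d : PySem.Dict String (List (List (String × String)))) (s : String) :
    (L.foldl (fun st r => st.setdefault r.1 []) d).getD s [] = d.getD s [] := by
  induction L generalizing d with
  | nil => rfl
  | cons r L ih =>
    simp only [List.foldl_cons]
    rw [ih]
    by_cases hs : s = r.1
    · subst hs; exact PySem.Dict.getD_setdefault_self d r.1 [] []
    · rw [PySem.Dict.getD_eq_get?_getD, PySem.Dict.get?_setdefault_of_ne _ _ hs,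
          ← PySem.Dict.getD_eq_get?_getD]

theorem pv_seed_keys (L : List (String × List (String × String)))
    (d : PySem.Dict String (List (List (String × String)))) :
    (L.foldl (fun st r => st.setdefault r.1 []) d).keys = PySem.Set.update d.keys (L.map (fun p => p.1)) := by
  induction L generalizing d with
  | nil => simp [PySem.Set.update_nil]
  | cons r L ih =>
    simp only [List.foldl_cons, List.map_cons]
    rw [ih, PySem.Set.update_cons]
    congr 1
    rw [PySem.Dict.keys_setdefault, PySem.Set.add_eq_ite]
    by_cases hc : d.contains r.1
    · simp [hc, (PySem.Dict.contains_iff_mem_keys d r.1).mp hc]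
    · have : r.1 ∉ d.keys := fun hm => hc ((PySem.Dict.contains_iff_mem_keys d r.1).mpr hm)
      simp [hc, this]

theorem pv_set_update_of_subset (s : PySem.Set String) (xs : List String)
    (h : ∀ x ∈ xs, x ∈ s) : PySem.Set.update s xs = s := by
  rw [PySem.Set.update_eq_append_filter]
  have hnil : (PySem.Set.ofList xs).filter (fun y => !(PySem.Set.contains s y)) = [] := by
    apply List.filter_eq_nil_iff.mpr
    intro y hy
    have hys : y ∈ s := h y ((PySem.Set.mem_ofList xs y).mp hy)
    simp [hys]
  rw [hnil, List.append_nil]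

-- B's flattening fold equals pvFlat
theorem pv_B_records (bl : List (String × List (List (String × String))))
    (acc : List (String × List (String × String))) :
    bl.foldl (fun recs p => p.2.foldl (fun recs trip =>
        recs ++ [((PySem.Dict.mk trip).getD "station" "",
                  [("trip_id", p.1), ("departure_time", (PySem.Dict.mk trip).getD "departure" "")])]) recs) acc
      = acc ++ pvFlat bl := by
  induction bl generalizing acc with
  | nil => simp [pvFlat]
  | cons p bl ih =>
    simp only [List.foldl_cons]
    rw [PySem.List.foldl_append_singleton_eq_map, ih]
    simp [pvFlat, pvStation, pvRec]

-- B's seeding fold over the nested structure equals the flat seeding fold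
theorem pv_B_seed (bl : List (String × List (List (String × String))))
    (d : PySem.Dict String (List (List (String × String)))) :
    bl.foldl (fun st p => p.2.foldl (fun st trip =>
        st.setdefault ((PySem.Dict.mk trip).getD "station" "") []) st) d
      = (pvFlat bl).foldl (fun st r => st.setdefault r.1 []) d := by
  rw [pvFlat, List.foldl_flatMap]
  apply PySem.List.foldl_congr_mem
  intro st p _
  rw [List.foldl_map]
  rfl

-- B's combined pair fold splits into the two folds above
theorem pv_B_pair (bl : List (String × List (List (String × String)))) :
    bl.foldl (fun sr p =>
        p.2.foldl (fun sr trip =>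
          ((sr.1.setdefault ((PySem.Dict.mk trip).getD "station" "") []),
           sr.2 ++ [((PySem.Dict.mk trip).getD "station" "",
                     [("trip_id", p.1), ("departure_time", (PySem.Dict.mk trip).getD "departure" "")])]))
          sr)
      ((PySem.Dict.empty : PySem.Dict String (List (List (String × String)))), ([] : List (String × List (String × String))))
      = ((pvFlat bl).foldl (fun st r => st.setdefault r.1 []) PySem.Dict.empty, pvFlat bl) := by
  have hsplit : ∀ (p : String × List (List (String × String)))
      (sr : PySem.Dict String (List (List (String × String))) × List (String × List (String × String))),
      p.2.foldl (fun sr trip =>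
          ((sr.1.setdefault ((PySem.Dict.mk trip).getD "station" "") []),
           sr.2 ++ [((PySem.Dict.mk trip).getD "station" "",
                     [("trip_id", p.1), ("departure_time", (PySem.Dict.mk trip).getD "departure" "")])])) sr
        = (p.2.foldl (fun st trip => st.setdefault ((PySem.Dict.mk trip).getD "station" "") []) sr.1,
           p.2.foldl (fun recs trip =>
             recs ++ [((PySem.Dict.mk trip).getD "station" "",
                       [("trip_id", p.1), ("departure_time", (PySem.Dict.mk trip).getD "departure" "")])]) sr.2) := by
    intro p sr
    obtain ⟨a, b⟩ := sr
    exact PySem.List.foldl_prod_mk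
      (f := fun st trip => st.setdefault ((PySem.Dict.mk trip).getD "station" "") [])
      (g := fun recs trip =>
        recs ++ [((PySem.Dict.mk trip).getD "station" "",
                  [("trip_id", p.1), ("departure_time", (PySem.Dict.mk trip).getD "departure" "")])])
      p.2 a b
  calc bl.foldl _ (PySem.Dict.empty, ([] : List (String × List (String × String))))
      = bl.foldl (fun sr p =>
          (p.2.foldl (fun st trip => st.setdefault ((PySem.Dict.mk trip).getD "station" "") []) sr.1,
           p.2.foldl (fun recs trip =>
             recs ++ [((PySem.Dict.mk trip).getD "station" "",
                       [("trip_id", p.1), ("departure_time", (PySem.Dict.mk trip).getD "departure" "")])]) sr.2))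
          (PySem.Dict.empty, []) := by
        apply PySem.List.foldl_congr_mem
        intro sr p _
        exact hsplit p sr
    _ = (_, _) := PySem.List.foldl_prod_mk
          (f := fun st p => p.2.foldl (fun st trip =>
            st.setdefault ((PySem.Dict.mk trip).getD "station" "") []) st)
          (g := fun recs p => p.2.foldl (fun recs trip =>
            recs ++ [((PySem.Dict.mk trip).getD "station" "",
                      [("trip_id", p.1), ("departure_time", (PySem.Dict.mk trip).getD "departure" "")])]) recs)
          bl PySem.Dict.empty []
    _ = ((pvFlat bl).foldl (fun st r => st.setdefault r.1 []) PySem.Dict.empty, pvFlat bl) := by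
        rw [pv_B_seed, pv_B_records]
        rfl

-- per-station bridge: sorting a station's records equals filtering the globally sorted records
theorem pv_per_station (L : List (String × List (String × String))) (s : String) :
    PySem.List.sorted ((L.filter (fun p => p.1 == s)).map (fun p => p.2))
        (fun x => (PySem.Dict.mk x).getD "departure_time" "") false
      = ((PySem.List.sorted L (fun r => (PySem.Dict.mk r.2).getD "departure_time" "") false).filter
          (fun p => p.1 == s)).map (fun p => p.2) := by
  rw [pv_sorted_filter (fun p => p.1 == s)
        (fun r => (PySem.Dict.mk r.2).getD "departure_time" "") L]
  exact (pv_sorted_map (fun p : String × List (String × String) => p.2)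
    (fun x => (PySem.Dict.mk x).getD "departure_time" "")
    (L.filter (fun p => p.1 == s))).symm

-- map over the items of a one-key dict
theorem pv_map_items_single {ν β : Type} (k : String) (v : ν) (f : String × ν → β) :
    (PySem.Dict.mk [(k, v)]).items.map f = [f (k, v)] := rfl

-- A on a non-empty input, in closed form
theorem pv_A_closed (p : String × List (List (String × String)))
    (rest : List (String × List (List (String × String)))) (date : String) :
    calculate_planned_interval_between_trains (p :: rest) date
      = [(date, (PySem.Set.ofList ((pvFlat (p :: rest)).map (fun r => r.1))).map
          (fun s => (s, PySem.List.sorted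
            (((pvFlat (p :: rest)).filter (fun r => r.1 == s)).map (fun r => r.2))
            (fun x => (PySem.Dict.mk x).getD "departure_time" "") false)))] := by
  unfold calculate_planned_interval_between_trains
  simp only [List.foldl_cons, PySem.Dict.contains_empty, Bool.false_eq_true, if_false,
    pv_empty_insert]
  rw [pv_A_inner date p.1 p.2 PySem.Dict.empty, pv_A_outer date rest]
  rw [show List.foldl pvG
        (List.foldl pvG PySem.Dict.empty (List.map (fun t => (pvStation t, pvRec p.1 t)) p.2))
        (pvFlat rest) = List.foldl pvG PySem.Dict.empty (pvFlat (p :: rest)) from by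
    simp only [pvFlat, List.flatMap_cons, List.foldl_append]]
  rw [pv_map_items_single]
  have hkeys : (List.foldl pvG PySem.Dict.empty (pvFlat (p :: rest))).keys
      = PySem.Set.ofList ((pvFlat (p :: rest)).map (fun r => r.1)) := by
    rw [pv_keys_g_fold, PySem.Dict.keys_empty, PySem.Set.update_nil_left]
  have hnodup : (List.foldl pvG PySem.Dict.empty (pvFlat (p :: rest))).keys.Nodup := by
    rw [hkeys]; exact PySem.Set.nodup_ofList _
  refine congrArg (fun y => [y]) ?_
  show (date, (List.foldl pvG PySem.Dict.empty (pvFlat (p :: rest))).items.map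
      (fun sp => (sp.1, PySem.List.sorted sp.2
        (fun x => (PySem.Dict.mk x).getD "departure_time" "") false))) = _
  refine congrArg (fun y => (date, y)) ?_
  rw [PySem.Dict.items_eq_map_keys _ hnodup [], hkeys, List.map_map]
  apply List.map_congr_left
  intro s _
  simp only [Function.comp_apply, pv_getD_g_fold, PySem.Dict.getD_empty, List.nil_append]

-- B on a non-empty input, in closed form
theorem pv_B_closed (p : String × List (List (String × String)))
    (rest : List (String × List (List (String × String)))) (date : String) :
    calculate_planned_interval_between_trains_alt (p :: rest) date
      = [(date, (PySem.Set.ofList ((pvFlat (p :: rest)).map (fun r => r.1))).map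
          (fun s => (s, ((PySem.List.sorted (pvFlat (p :: rest))
              (fun r => (PySem.Dict.mk r.2).getD "departure_time" "") false).filter
              (fun r => r.1 == s)).map (fun r => r.2))))] := by
  unfold calculate_planned_interval_between_trains_alt
  simp only [List.isEmpty_cons, Bool.false_eq_true, if_false]
  simp only [pv_B_pair (p :: rest)]
  have hseedkeys : ((pvFlat (p :: rest)).foldl (fun st r => st.setdefault r.1 [])
        (PySem.Dict.empty : PySem.Dict String (List (List (String × String))))).keys
      = PySem.Set.ofList ((pvFlat (p :: rest)).map (fun r => r.1)) := by
    rw [pv_seed_keys, PySem.Dict.keys_empty, PySem.Set.update_nil_left]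
  have hstkeys : ((PySem.List.sorted (pvFlat (p :: rest))
        (fun r => (PySem.Dict.mk r.2).getD "departure_time" "") false).foldl
        (fun st r => st.modify r.1 [] (fun l => l ++ [r.2]))
        ((pvFlat (p :: rest)).foldl (fun st r => st.setdefault r.1 [])
          (PySem.Dict.empty : PySem.Dict String (List (List (String × String)))))).keys
      = PySem.Set.ofList ((pvFlat (p :: rest)).map (fun r => r.1)) := by
    rw [PySem.Dict.keys_foldl_modify_key _
          (fun (r : String × List (String × String)) => r.1) []
          (fun (_ : PySem.Dict String (List (List (String × String))))
               (r : String × List (String × String)) => fun l => l ++ [r.2]) _,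
        hseedkeys]
    apply pv_set_update_of_subset
    intro x hx
    obtain ⟨r, hr, rfl⟩ := List.mem_map.mp hx
    have hrL : r ∈ pvFlat (p :: rest) := (PySem.List.mem_sorted _ _ _ _).mp hr
    exact (PySem.Set.mem_ofList _ _).mpr (List.mem_map_of_mem hrL)
  refine congrArg (fun y => [(date, y)]) ?_
  rw [PySem.Dict.items_eq_map_keys _ (by rw [hstkeys]; exact PySem.Set.nodup_ofList _) [],
      hstkeys]
  apply List.map_congr_left
  intro s _
  simp only [PySem.Dict.getD_foldl_modify_append, pv_seed_getD, PySem.Dict.getD_empty,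
    List.nil_append]

-- ===== VERDICT (by name: the statement is the Claim_ definition above) =====
theorem calculate_planned_interval_between_trains_spec : Claim_equal_calculate_planned_interval_between_trains := by
  intro bl date _ _
  unfold Spec_calculate_planned_interval_between_trains
  cases bl with
  | nil => rfl
  | cons p rest =>
    rw [pv_A_closed, pv_B_closed]
    refine congrArg (fun z => [(date, z)]) ?_
    exact List.map_congr_left (fun s _ => by rw [pv_per_station])
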